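-- pv_equiv track=rewrite | github.com/rahulgavhar/AUGENBLICK-HACKATHON-2026 | task-scripts/task_19_compare.py | _vocab_stats
-- ===== SOURCE A (Python) =====
-- def _vocab_stats(name: str, vocab: dict[str, int]) -> dict[str, int]:
--     # simple heuristics: whole-word vs subword-ish vs single-char-ish
--     n = len(vocab)
--     specials = sum(1 for t in vocab if t.startswith("<") and t.endswith(">"))
--
--     if name == "wordlevel":
--         single_char = sum(1 for t in vocab if len(t) == 1 and not (t.startswith("<") and t.endswith(">")))
--         multi = n - specials - single_char
--         return {"vocab": n, "special": specials, "single_char": single_char, "multi_char": multi}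
--
--     if name == "bpe":
--         cont = 0
--         cont_single = 0
--         cont_multi = 0
--         noncont_single = 0
--         noncont_multi = 0
--
--         for token in vocab:
--             if token.startswith("<") and token.endswith(">"):
--                 continue
--             is_cont = token.startswith("##")
--             base = token[2:] if is_cont else token
--             if is_cont:
--                 cont += 1
--                 if len(base) == 1:
--                     cont_single += 1
--                 else:
--                     cont_multi += 1
--             else:
--                 if len(base) == 1:
--                     noncont_single += 1
--                 else:
--                     noncont_multi += 1
--
--         return {
--             "vocab": n,
--             "special": specials,
--             "continuation(##)": cont,
--             "cont_single": cont_single,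
--             "cont_multi": cont_multi,
--             "single_char": noncont_single,
--             "multi_char": noncont_multi,
--         }
--
--     # unigram
--     single = sum(1 for t in vocab if len(t) == 1 and not (t.startswith("<") and t.endswith(">")))
--     multi = n - specials - single
--     return {"vocab": n, "special": specials, "single_char": single, "multi_char": multi}
-- ===== SOURCE B (Python) =====
-- def _category(t: str) -> str:
--     # pure token -> category label
--     if t.startswith("<") and t.endswith(">"):
--         return "special"
--     if t.startswith("##"):
--         return "cs" if len(t) == 3 else "cm"
--     return "s" if len(t) == 1 else "m"
--
--
-- def _vocab_stats(name: str, vocab: dict[str, int]) -> dict[str, int]: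
--     # map tokens to category labels once, then answer every tally as a count query
--     labels = [_category(t) for t in vocab]
--     n = len(labels)
--     sp = labels.count("special")
--     if name == "bpe":
--         cs = labels.count("cs")
--         cm = labels.count("cm")
--         return {
--             "vocab": n,
--             "special": sp,
--             "continuation(##)": cs + cm,
--             "cont_single": cs,
--             "cont_multi": cm,
--             "single_char": labels.count("s"),
--             "multi_char": labels.count("m"),
--         }
--     s = labels.count("s")
--     return {"vocab": n, "special": sp, "single_char": s, "multi_char": n - sp - s}
-- ===== Notes on version B (the rewrite author's own statement) =====
-- stated objective: alternative
-- what changed: B first maps every token to a category label via a pure classifier function (special/cs/cm/s/m), producing a labels list, and then answers each statistic as a generic list.count query on that list (with continuation(##)=cs+cm and multi=n-special-single by arithmetic), instead of A's branch-specific conditional-accumulation scans (a specials generator sum plus either another filtered sum or a five-counter loop).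
import Mathlib
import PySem

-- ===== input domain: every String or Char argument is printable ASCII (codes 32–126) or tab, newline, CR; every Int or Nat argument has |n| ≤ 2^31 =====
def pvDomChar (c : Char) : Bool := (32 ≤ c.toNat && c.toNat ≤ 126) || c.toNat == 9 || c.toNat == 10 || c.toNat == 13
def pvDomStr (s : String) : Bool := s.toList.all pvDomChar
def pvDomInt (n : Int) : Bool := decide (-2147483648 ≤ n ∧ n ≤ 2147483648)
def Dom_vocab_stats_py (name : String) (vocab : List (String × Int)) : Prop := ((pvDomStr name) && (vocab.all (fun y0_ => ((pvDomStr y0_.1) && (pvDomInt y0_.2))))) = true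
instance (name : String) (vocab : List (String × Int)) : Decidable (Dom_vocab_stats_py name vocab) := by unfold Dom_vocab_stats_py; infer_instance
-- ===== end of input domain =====

-- B maps each token to a category label and answers every statistic as a count query on the
-- labels list, instead of A's branch-specific conditional-accumulation scans (objective: alternative).

-- ===== PORT A =====
-- t.startswith("<") and t.endswith(">")
def pvIsSpecial (t : String) : Bool :=
  PySem.Str.startswith t "<" && PySem.Str.endswith t ">"

-- the body of 'sum(1 for t in vocab if t.startswith("<") and t.endswith(">"))'
def pvASpecStep (a : Int) (p : String × Int) : Int :=
  if pvIsSpecial p.1 then a + 1 else a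

-- the body of 'sum(1 for t in vocab if len(t) == 1 and not (...))'
def pvASingleStep (a : Int) (p : String × Int) : Int :=
  if PySem.Str.len p.1 == 1 && !(pvIsSpecial p.1) then a + 1 else a

-- the body of the bpe 'for token in vocab' loop; state = (cont, cont_single, cont_multi, noncont_single, noncont_multi)
def pvABpeStep (q : Int × Int × Int × Int × Int) (p : String × Int) : Int × Int × Int × Int × Int :=
  let token := p.1
  if pvIsSpecial token then q
  else
    let is_cont := PySem.Str.startswith token "##"
    let base := if is_cont then PySem.Str.slice token (some 2) none else token
    if is_cont then
      if PySem.Str.len base == 1 then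
        (q.1 + 1, q.2.1 + 1, q.2.2.1, q.2.2.2.1, q.2.2.2.2)
      else
        (q.1 + 1, q.2.1, q.2.2.1 + 1, q.2.2.2.1, q.2.2.2.2)
    else
      if PySem.Str.len base == 1 then
        (q.1, q.2.1, q.2.2.1, q.2.2.2.1 + 1, q.2.2.2.2)
      else
        (q.1, q.2.1, q.2.2.1, q.2.2.2.1, q.2.2.2.2 + 1)

def vocab_stats_py (name : String) (vocab : List (String × Int)) : List (String × Int) :=
  let n : Int := vocab.length
  let specials : Int := vocab.foldl pvASpecStep 0
  if name = "wordlevel" then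
    let single_char : Int := vocab.foldl pvASingleStep 0
    let multi : Int := n - specials - single_char
    [("vocab", n), ("special", specials), ("single_char", single_char), ("multi_char", multi)]
  else if name = "bpe" then
    let q := vocab.foldl pvABpeStep (0, 0, 0, 0, 0)
    [("vocab", n), ("special", specials), ("continuation(##)", q.1),
     ("cont_single", q.2.1), ("cont_multi", q.2.2.1),
     ("single_char", q.2.2.2.1), ("multi_char", q.2.2.2.2)]
  else
    let single : Int := vocab.foldl pvASingleStep 0
    let multi : Int := n - specials - single
    [("vocab", n), ("special", specials), ("single_char", single), ("multi_char", multi)]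

-- ===== PORT B =====
-- _category: pure token -> label classifier
def pvCategory (t : String) : String :=
  if pvIsSpecial t then "special"
  else if PySem.Str.startswith t "##" then
    (if PySem.Str.len t == 3 then "cs" else "cm")
  else if PySem.Str.len t == 1 then "s" else "m"

def vocab_stats_py_alt (name : String) (vocab : List (String × Int)) : List (String × Int) :=
  let labels := vocab.map (fun p => pvCategory p.1)
  let n : Int := labels.length
  let sp : Int := PySem.List.count labels "special"
  if name = "bpe" then
    let cs : Int := PySem.List.count labels "cs"
    let cm : Int := PySem.List.count labels "cm"
    [("vocab", n), ("special", sp), ("continuation(##)", cs + cm),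
     ("cont_single", cs), ("cont_multi", cm),
     ("single_char", (PySem.List.count labels "s" : Int)),
     ("multi_char", (PySem.List.count labels "m" : Int))]
  else
    let s : Int := PySem.List.count labels "s"
    [("vocab", n), ("special", sp), ("single_char", s), ("multi_char", n - sp - s)]

-- ===== PRECONDITION & SPEC =====
def Spec_vocab_stats_py (name : String) (vocab : List (String × Int)) (out : List (String × Int)) : Prop := out = vocab_stats_py_alt name vocab
instance (name : String) (vocab : List (String × Int)) (out : List (String × Int)) : Decidable (Spec_vocab_stats_py name vocab out) := by unfold Spec_vocab_stats_py; infer_instance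

-- ===== CLAIM (what is proved, stated in full; the proofs are below) =====
def Claim_equal_vocab_stats_py : Prop := ∀ (name : String) (vocab : List (String × Int)), Dom_vocab_stats_py name vocab → Spec_vocab_stats_py name vocab (vocab_stats_py name vocab)

-- ===== LEMMAS AND PROOFS =====

-- count of label v in the mapped labels list, as Int
def pvCnt (v : String) (vocab : List (String × Int)) : Int :=
  (PySem.List.count (vocab.map (fun p => pvCategory p.1)) v : Int)

theorem pvCnt_nil (v : String) : pvCnt v [] = 0 := rfl

theorem pvCnt_cons (v : String) (p : String × Int) (rest : List (String × Int)) :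
    pvCnt v (p :: rest) = (if pvCategory p.1 = v then 1 else 0) + pvCnt v rest := by
  simp only [pvCnt, List.map_cons, PySem.List.count_eq, List.count_cons]
  by_cases h : pvCategory p.1 = v <;> simp [h, beq_iff_eq] <;> omega




-- Chars-level facts about "##"-prefixed tokens
theorem pv_len2 {t : String} (h : PySem.Chars.startswith t.toList ['#', '#'] = true) :
    2 ≤ t.length := by
  have h' : (['#', '#'] : List Char) <+: t.toList := by
    simpa [PySem.Chars.startswith_iff] using h
  have := h'.length_le
  simpa using this

theorem pv_drop2 (t : String) :
    PySem.List.slice t.toList (some 2) none = t.toList.drop 2 := by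
  simpa using PySem.List.slice_from (xs := t.toList) (a := (2 : Int)) (by norm_num)

-- per-token value of each of A's loop bodies, in terms of the token's category
theorem pvASpecStep_eq (a : Int) (p : String × Int) :
    pvASpecStep a p = a + (if pvCategory p.1 = "special" then 1 else 0) := by
  unfold pvASpecStep pvCategory
  split_ifs <;> simp_all <;> omega

theorem pvASingleStep_eq (a : Int) (p : String × Int) :
    pvASingleStep a p = a + (if pvCategory p.1 = "s" then 1 else 0) := by
  unfold pvASingleStep pvCategory
  split_ifs <;> simp_all <;>
    first
      | omega
      | exact absurd (pv_len2 (by assumption)) (by omega)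

theorem pvABpeStep_eq (q : Int × Int × Int × Int × Int) (p : String × Int) :
    pvABpeStep q p =
      (q.1 + ((if pvCategory p.1 = "cs" then 1 else 0) + (if pvCategory p.1 = "cm" then 1 else 0)),
       q.2.1 + (if pvCategory p.1 = "cs" then 1 else 0),
       q.2.2.1 + (if pvCategory p.1 = "cm" then 1 else 0),
       q.2.2.2.1 + (if pvCategory p.1 = "s" then 1 else 0),
       q.2.2.2.2 + (if pvCategory p.1 = "m" then 1 else 0)) := by
  unfold pvABpeStep pvCategory
  split_ifs <;> simp_all [pv_drop2] <;>
    (have := pv_len2 (by assumption); omega)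

theorem pv_spec_fold (vocab : List (String × Int)) :
    ∀ a : Int, vocab.foldl pvASpecStep a = a + pvCnt "special" vocab := by
  induction vocab with
  | nil => intro a; simp [pvCnt_nil]
  | cons p rest ih =>
      intro a
      rw [List.foldl_cons, ih, pvCnt_cons, pvASpecStep_eq]
      omega

theorem pv_single_fold (vocab : List (String × Int)) :
    ∀ a : Int, vocab.foldl pvASingleStep a = a + pvCnt "s" vocab := by
  induction vocab with
  | nil => intro a; simp [pvCnt_nil]
  | cons p rest ih =>
      intro a
      rw [List.foldl_cons, ih, pvCnt_cons, pvASingleStep_eq]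
      omega

theorem pv_bpe_fold (vocab : List (String × Int)) :
    ∀ q : Int × Int × Int × Int × Int,
      vocab.foldl pvABpeStep q =
        (q.1 + (pvCnt "cs" vocab + pvCnt "cm" vocab), q.2.1 + pvCnt "cs" vocab,
         q.2.2.1 + pvCnt "cm" vocab, q.2.2.2.1 + pvCnt "s" vocab,
         q.2.2.2.2 + pvCnt "m" vocab) := by
  induction vocab with
  | nil => intro q; simp [pvCnt_nil]
  | cons p rest ih =>
      intro q
      rw [List.foldl_cons, ih, pvABpeStep_eq]
      simp only [pvCnt_cons]
      refine Prod.ext ?_ (Prod.ext ?_ (Prod.ext ?_ (Prod.ext ?_ ?_))) <;> simp <;> omega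

-- ===== VERDICT (by name: the statement is the Claim_ definition above) =====
theorem vocab_stats_py_spec : Claim_equal_vocab_stats_py := by
  intro name vocab _
  show vocab_stats_py name vocab = vocab_stats_py_alt name vocab
  unfold vocab_stats_py vocab_stats_py_alt
  rw [pv_spec_fold vocab 0, pv_single_fold vocab 0, pv_bpe_fold vocab (0, 0, 0, 0, 0)]
  by_cases h1 : name = "wordlevel"
  · simp [h1, pvCnt, PySem.List.count_eq]
  · by_cases h2 : name = "bpe"
    · simp [h2, pvCnt, PySem.List.count_eq]
    · simp [h1, h2, pvCnt, PySem.List.count_eq]
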